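-- pv_equiv track=rewrite | github.com/Jose-luis-echemendia/feature_model | backend/app/services/feature_model/fm_analysis_facade.py | _compute_atomic_sets
-- ===== SOURCE A (Python) =====
-- from typing import Any, Dict, List, Optional
--
-- def _compute_atomic_sets(
--     configs: List[List[str]], feature_ids: List[str]
-- ) -> List[List[str]]:
--     if not configs:
--         return []
--
--     vectors: Dict[tuple[bool, ...], List[str]] = {}
--     config_sets = [set(cfg) for cfg in configs]
--
--     for fid in feature_ids:
--         vector = tuple(fid in cfg for cfg in config_sets)
--         vectors.setdefault(vector, []).append(fid)
--
--     return [group for group in vectors.values() if len(group) > 1]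
-- ===== SOURCE B (Python) =====
-- from typing import List
--
--
-- def _compute_atomic_sets(
--     configs: List[List[str]], feature_ids: List[str]
-- ) -> List[List[str]]:
--     if not configs:
--         return []
--
--     # Partition refinement: start with all features in one block and split every
--     # block by membership in each config in turn; blocks that are never separated
--     # are exactly the atomic sets.  Indices are carried so the blocks can be put
--     # back into first-occurrence order at the end.
--     parts = [list(enumerate(feature_ids))]
--     for cfg in configs:
--         s = set(cfg)
--         refined = []
--         for part in parts:
--             inside = [p for p in part if p[1] in s]
--             outside = [p for p in part if p[1] not in s]
--             if inside:
--                 refined.append(inside)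
--             if outside:
--                 refined.append(outside)
--         parts = refined
--
--     parts.sort(key=lambda part: part[0][0])
--     return [[f for _, f in part] for part in parts if len(part) > 1]
-- ===== Notes on version B (the rewrite author's own statement) =====
-- stated objective: alternative
-- what changed: B uses partition refinement: it starts with one block holding all features and splits every block by membership in each config in turn (no signature vectors, no dict keyed by signature), then restores first-occurrence order by sorting the surviving blocks by their first index.
import Mathlib
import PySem

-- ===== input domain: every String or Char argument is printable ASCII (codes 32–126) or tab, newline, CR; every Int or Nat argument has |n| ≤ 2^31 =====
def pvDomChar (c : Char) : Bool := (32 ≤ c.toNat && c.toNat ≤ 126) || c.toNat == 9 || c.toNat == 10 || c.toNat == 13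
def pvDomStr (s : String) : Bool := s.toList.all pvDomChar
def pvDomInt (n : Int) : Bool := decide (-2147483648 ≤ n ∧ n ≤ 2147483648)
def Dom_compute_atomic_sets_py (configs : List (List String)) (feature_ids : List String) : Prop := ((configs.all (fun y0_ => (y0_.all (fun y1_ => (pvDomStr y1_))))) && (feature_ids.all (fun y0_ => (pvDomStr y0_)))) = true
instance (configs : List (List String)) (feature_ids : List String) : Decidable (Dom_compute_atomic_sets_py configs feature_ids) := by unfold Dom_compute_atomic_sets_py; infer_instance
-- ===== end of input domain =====

-- B replaces A's signature-vector grouping dict by partition refinement (split one block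
-- per config, then restore first-occurrence order by sorting blocks by first index);
-- objective: alternative algorithm of similar cost.

-- ===== PORT A =====
-- literal transliteration of _compute_atomic_sets: boolean vector per feature,
-- grouped in an insertion-ordered dict via setdefault(...).append (= insert of getD ++ [fid]).
def compute_atomic_sets_py (configs : List (List String)) (feature_ids : List String) : List (List String) :=
  if configs.isEmpty then []
  else
    let config_sets := configs.map (fun cfg => PySem.Set.ofList cfg)
    let vectors := feature_ids.foldl
      (fun (d : PySem.Dict (List Bool) (List String)) fid =>
        let vector := config_sets.map (fun s => decide (fid ∈ s))
        PySem.Dict.insert d vector (PySem.Dict.getD d vector [] ++ [fid]))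
      PySem.Dict.empty
    (PySem.Dict.values vectors).filter (fun group => group.length > 1)

-- ===== PORT B =====
-- literal transliteration of Source B: partition refinement over enumerate(feature_ids),
-- then parts.sort(key=lambda part: part[0][0]) — blocks are never empty when the key
-- is taken, so headD is exact — and the final comprehension (filter then map).
def compute_atomic_sets_py_alt (configs : List (List String)) (feature_ids : List String) : List (List String) :=
  if configs.isEmpty then []
  else
    let parts := configs.foldl
      (fun (parts : List (List (Int × String))) cfg =>
        let s := PySem.Set.ofList cfg
        parts.foldl
          (fun refined part =>
            let inside := part.filter (fun p => decide (p.2 ∈ s))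
            let outside := part.filter (fun p => !decide (p.2 ∈ s))
            let refined := if inside.isEmpty then refined else refined ++ [inside]
            if outside.isEmpty then refined else refined ++ [outside])
          [])
      [PySem.List.enumerate feature_ids 0]
    let parts := PySem.List.sorted parts (fun part => (part.headD (0, "")).1) false
    (parts.filter (fun part => part.length > 1)).map (fun part => part.map (fun p => p.2))

-- ===== PRECONDITION & SPEC =====
def Spec_compute_atomic_sets_py (configs : List (List String)) (feature_ids : List String) (out : List (List String)) : Prop := out = compute_atomic_sets_py_alt configs feature_ids
instance (configs : List (List String)) (feature_ids : List String) (out : List (List String)) : Decidable (Spec_compute_atomic_sets_py configs feature_ids out) := by unfold Spec_compute_atomic_sets_py; infer_instance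

-- ===== CLAIM (what is proved, stated in full; the proofs are below) =====
def Claim_equal_compute_atomic_sets_py : Prop := ∀ (configs : List (List String)) (feature_ids : List String), Dom_compute_atomic_sets_py configs feature_ids → Spec_compute_atomic_sets_py configs feature_ids (compute_atomic_sets_py configs feature_ids)

-- ===== LEMMAS AND PROOFS =====

-- the class of key c among the enumerated features, for key function k
def pvCls (l : List (Int × String)) (k : (Int × String) → List Bool) (c : List Bool) : List (Int × String) :=
  l.filter (fun p => k p == c)

-- one refinement step extends every feature's key by membership in s
def pvKext (k : (Int × String) → List Bool) (s : PySem.Set String) : (Int × String) → List Bool :=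
  fun p => k p ++ [decide (p.2 ∈ s)]

-- the blocks one part of key c is split into (only the nonempty ones)
def pvG (s : PySem.Set String) (part : List (Int × String)) : List (List (Int × String)) :=
  (if (part.filter (fun p => decide (p.2 ∈ s))).isEmpty then []
   else [part.filter (fun p => decide (p.2 ∈ s))]) ++
  (if (part.filter (fun p => !decide (p.2 ∈ s))).isEmpty then []
   else [part.filter (fun p => !decide (p.2 ∈ s))])

-- the key list after one refinement step
def pvNewL (l : List (Int × String)) (k : (Int × String) → List Bool) (s : PySem.Set String)
    (L : List (List Bool)) : List (List Bool) :=
  L.flatMap (fun c =>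
    (if (pvCls l (pvKext k s) (c ++ [true])).isEmpty then [] else [c ++ [true]]) ++
    (if (pvCls l (pvKext k s) (c ++ [false])).isEmpty then [] else [c ++ [false]]))

-- sort key of a block
def pvKeyf (part : List (Int × String)) : Int := (part.headD (0, "")).1

-- invariant of the refinement loop: parts is the list of key classes, in some order,
-- with distinct keys, covering every feature, all classes nonempty
def pvInv (l : List (Int × String)) (k : (Int × String) → List Bool)
    (L : List (List Bool)) (parts : List (List (Int × String))) : Prop :=
  parts = L.map (pvCls l k) ∧ L.Nodup ∧ (∀ p ∈ l, k p ∈ L) ∧ ∀ c ∈ L, pvCls l k c ≠ []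

theorem pvInv_congr (l : List (Int × String)) (k k' : (Int × String) → List Bool)
    (hk : ∀ p, k p = k' p) (L : List (List Bool)) (parts : List (List (Int × String)))
    (h : pvInv l k L parts) : pvInv l k' L parts := by
  have hke : k = k' := funext hk
  rwa [← hke]

theorem pvStep_eq (s : PySem.Set String) (parts : List (List (Int × String))) :
    parts.foldl
      (fun refined part =>
        let inside := part.filter (fun p => decide (p.2 ∈ s))
        let outside := part.filter (fun p => !decide (p.2 ∈ s))
        let refined := if inside.isEmpty then refined else refined ++ [inside]
        if outside.isEmpty then refined else refined ++ [outside])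
      [] = parts.flatMap (pvG s) := by
  
  have hfun : (fun (refined : List (List (Int × String))) part =>
      let inside := part.filter (fun p => decide (p.2 ∈ s))
      let outside := part.filter (fun p => !decide (p.2 ∈ s))
      let refined := if inside.isEmpty then refined else refined ++ [inside]
      if outside.isEmpty then refined else refined ++ [outside])
      = fun (refined : List (List (Int × String))) part => refined ++ pvG s part := by
    funext refined part
    simp only [pvG]
    split_ifs <;> simp
  rw [hfun, PySem.List.foldl_append_eq_flatMap]
  simp

theorem pvCls_ext_true (l : List (Int × String)) (k : (Int × String) → List Bool)
    (s : PySem.Set String) (c : List Bool) :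
    pvCls l (pvKext k s) (c ++ [true]) = (pvCls l k c).filter (fun p => decide (p.2 ∈ s)) := by
  
  simp only [pvCls, pvKext, List.filter_filter]
  apply List.filter_congr
  intro p _
  by_cases h : k p = c <;> by_cases hm : p.2 ∈ s <;> simp [h, hm]

theorem pvCls_ext_false (l : List (Int × String)) (k : (Int × String) → List Bool)
    (s : PySem.Set String) (c : List Bool) :
    pvCls l (pvKext k s) (c ++ [false]) = (pvCls l k c).filter (fun p => !decide (p.2 ∈ s)) := by
  
  simp only [pvCls, pvKext, List.filter_filter]
  apply List.filter_congr
  intro p _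
  by_cases h : k p = c <;> by_cases hm : p.2 ∈ s <;> simp [h, hm]

theorem pvMemNewL (l : List (Int × String)) (k : (Int × String) → List Bool)
    (s : PySem.Set String) (L : List (List Bool)) :
    ∀ d ∈ pvNewL l k s L, (∃ c ∈ L, ∃ b, d = c ++ [b]) ∧ pvCls l (pvKext k s) d ≠ [] := by
  intro d hd
  simp only [pvNewL, List.mem_flatMap, List.mem_append] at hd
  obtain ⟨c, hc, hd⟩ := hd
  rcases hd with hd | hd <;> split at hd <;> simp_all [List.isEmpty_iff]

theorem pvNodupNewL (l : List (Int × String)) (k : (Int × String) → List Bool)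
    (s : PySem.Set String) (L : List (List Bool)) (hnd : L.Nodup) :
    (pvNewL l k s L).Nodup := by
  induction L with
  | nil => simp [pvNewL]
  | cons c L ih =>
    have hcL : c ∉ L := (List.nodup_cons.mp hnd).1
    have hndL : L.Nodup := (List.nodup_cons.mp hnd).2
    have hNewCons : pvNewL l k s (c :: L) =
        ((if (pvCls l (pvKext k s) (c ++ [true])).isEmpty then [] else [c ++ [true]]) ++
         (if (pvCls l (pvKext k s) (c ++ [false])).isEmpty then [] else [c ++ [false]])) ++
        pvNewL l k s L := by simp [pvNewL]
    rw [hNewCons, List.nodup_append]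
    refine ⟨by split_ifs <;> simp, ih hndL, ?_⟩
    intro d hd d' hd'
    have h1 : ∃ b, d = c ++ [b] := by
      simp only [List.mem_append] at hd
      rcases hd with hd | hd <;> split at hd <;> simp_all
    obtain ⟨c', hc', b', hdb'⟩ := (pvMemNewL l k s L d' hd').1
    obtain ⟨b, hb⟩ := h1
    intro heq
    rw [hb, hdb'] at heq
    have hcc : c = c' ∧ b = b' := by simpa using heq
    exact hcL (hcc.1 ▸ hc')

theorem pvStep (l : List (Int × String)) (k : (Int × String) → List Bool)
    (s : PySem.Set String) (L : List (List Bool)) (parts : List (List (Int × String)))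
    (h : pvInv l k L parts) :
    pvInv l (pvKext k s) (pvNewL l k s L)
      (parts.foldl
        (fun refined part =>
          let inside := part.filter (fun p => decide (p.2 ∈ s))
          let outside := part.filter (fun p => !decide (p.2 ∈ s))
          let refined := if inside.isEmpty then refined else refined ++ [inside]
          if outside.isEmpty then refined else refined ++ [outside])
        []) := by
  obtain ⟨hp, hnd, hcov, hne⟩ := h
  refine ⟨?_, pvNodupNewL l k s L hnd, ?_, fun c hc => (pvMemNewL l k s L c hc).2⟩
  · -- the fold produces exactly the classes of the extended keys
    rw [pvStep_eq, hp]
    have hpoint : ∀ c, pvG s (pvCls l k c) =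
        ((if (pvCls l (pvKext k s) (c ++ [true])).isEmpty then [] else [c ++ [true]]) ++
         (if (pvCls l (pvKext k s) (c ++ [false])).isEmpty then [] else [c ++ [false]])).map
          (pvCls l (pvKext k s)) := by
      intro c
      simp only [pvG, pvCls_ext_true, pvCls_ext_false, List.map_append]
      congr 1 <;> split_ifs <;> simp [pvCls_ext_true, pvCls_ext_false]
    rw [List.flatMap_map, pvNewL, List.map_flatMap]
    exact List.flatMap_congr (fun c _ => hpoint c)
  · -- coverage
    intro p hpl
    have hcp := hcov p hpl
    have hmemcls : ∀ b, decide (p.2 ∈ s) = b → p ∈ pvCls l (pvKext k s) (k p ++ [b]) := by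
      intro b hb
      simp [pvCls, pvKext, hb, hpl]
    simp only [pvNewL, List.mem_flatMap]
    refine ⟨k p, hcp, ?_⟩
    by_cases hm : decide (p.2 ∈ s) = true
    · have := hmemcls true hm
      simp only [List.mem_append]
      left
      rw [if_neg (by simp only [List.isEmpty_iff]; exact List.ne_nil_of_mem this)]
      simp [pvKext, hm]
    · have hmf : decide (p.2 ∈ s) = false := by simpa using hm
      have := hmemcls false hmf
      simp only [List.mem_append]
      right
      rw [if_neg (by simp only [List.isEmpty_iff]; exact List.ne_nil_of_mem this)]
      simp [pvKext, hmf]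

theorem pvOuter (l : List (Int × String)) (cfgs : List (List String))
    (k : (Int × String) → List Bool) (L : List (List Bool)) (parts : List (List (Int × String)))
    (h : pvInv l k L parts) :
    ∃ L', pvInv l (fun p => k p ++ cfgs.map (fun c => decide (p.2 ∈ PySem.Set.ofList c))) L'
      (cfgs.foldl
        (fun (parts : List (List (Int × String))) cfg =>
          let s := PySem.Set.ofList cfg
          parts.foldl
            (fun refined part =>
              let inside := part.filter (fun p => decide (p.2 ∈ s))
              let outside := part.filter (fun p => !decide (p.2 ∈ s))
              let refined := if inside.isEmpty then refined else refined ++ [inside]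
              if outside.isEmpty then refined else refined ++ [outside])
            [])
        parts) := by
  induction cfgs generalizing k L parts with
  | nil => exact ⟨L, pvInv_congr l k _ (fun p => by simp) L parts h⟩
  | cons cfg cfgs ih =>
    simp only [List.foldl_cons]
    have h1 := pvStep l k (PySem.Set.ofList cfg) L parts h
    obtain ⟨L', h2⟩ := ih (pvKext k (PySem.Set.ofList cfg)) (pvNewL l k (PySem.Set.ofList cfg) L) _ h1
    exact ⟨L', pvInv_congr l _ _ (fun p => by simp [pvKext, List.append_assoc]) L' _ h2⟩

-- the classes, in first-occurrence order of their keys, have strictly increasing head indices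
theorem pvSortedTarget (l : List (Int × String)) (hpl : l.Pairwise (fun p q => p.1 < q.1))
    (k : (Int × String) → List Bool) :
    (PySem.Set.ofList (l.map k)).Pairwise
      (fun c c' => pvKeyf (pvCls l k c) < pvKeyf (pvCls l k c')) := by
  induction l using List.reverseRecOn with
  | nil => simp
  | append_singleton l x ih =>
    have hpl' : l.Pairwise (fun p q => p.1 < q.1) := (List.pairwise_append.mp hpl).1
    have hx : ∀ p ∈ l, p.1 < x.1 := by
      have h2 := (List.pairwise_append.mp hpl).2.2
      intro p hp
      exact h2 p hp x (by simp)
    have hcls_app : ∀ c, pvCls (l ++ [x]) k c = pvCls l k c ++ (if k x == c then [x] else []) := by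
      intro c
      simp only [pvCls, List.filter_append]
      congr 1
      by_cases h : k x = c <;> simp [h]
    have hkeyf_app : ∀ (A B : List (Int × String)), A ≠ [] → pvKeyf (A ++ B) = pvKeyf A := by
      intro A B hA
      cases A with
      | nil => simp at hA
      | cons a t => simp [pvKeyf]
    have hne : ∀ c ∈ PySem.Set.ofList (l.map k), pvCls l k c ≠ [] := by
      intro c hcm
      rw [PySem.Set.mem_ofList] at hcm
      obtain ⟨p, hp, hkp⟩ := List.mem_map.mp hcm
      exact List.ne_nil_of_mem (List.mem_filter.mpr ⟨hp, by simp [hkp]⟩)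
    have hkeyf_eq : ∀ c ∈ PySem.Set.ofList (l.map k),
        pvKeyf (pvCls (l ++ [x]) k c) = pvKeyf (pvCls l k c) := by
      intro c hcm
      rw [hcls_app c, hkeyf_app _ _ (hne c hcm)]
    have hmapapp : (l ++ [x]).map k = l.map k ++ [k x] := by simp
    rw [hmapapp, PySem.Set.ofList_append_singleton]
    by_cases hmem : k x ∈ PySem.Set.ofList (l.map k)
    · rw [PySem.Set.add_of_mem hmem]
      exact List.Pairwise.imp_of_mem
        (fun {a} {b} ha hb hab => by rw [hkeyf_eq a ha, hkeyf_eq b hb]; exact hab) (ih hpl')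
    · rw [PySem.Set.add_of_not_mem hmem]
      rw [List.pairwise_append]
      refine ⟨List.Pairwise.imp_of_mem
        (fun {a} {b} ha hb hab => by rw [hkeyf_eq a ha, hkeyf_eq b hb]; exact hab) (ih hpl'),
        by simp, ?_⟩
      intro c hcm c' hc'
      have hc'' : c' = k x := by simpa using hc'
      subst hc''
      have hclsnil : pvCls l k (k x) = [] := by
        simp only [pvCls, List.filter_eq_nil_iff]
        intro p hp hkp
        apply hmem
        rw [PySem.Set.mem_ofList]
        exact List.mem_map.mpr ⟨p, hp, by simpa using hkp⟩
      have hclsx : pvCls (l ++ [x]) k (k x) = [x] := by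
        rw [hcls_app, hclsnil]
        simp
      rw [hclsx, hkeyf_eq c hcm]
      obtain ⟨p, t, hpt⟩ := List.exists_cons_of_ne_nil (hne c hcm)
      have hpin : p ∈ pvCls l k c := by rw [hpt]; exact List.mem_cons_self
      have hpmem : p ∈ l := (List.mem_filter.mp hpin).1
      rw [hpt]
      simpa [pvKeyf] using hx p hpmem

-- A's grouping fold: the value at key c is the filter of the processed features
theorem pvGetD_groupfold (key : String → List Bool) (l : List String)
    (d : PySem.Dict (List Bool) (List String)) (c : List Bool) :
    (l.foldl (fun d x => PySem.Dict.insert d (key x) (PySem.Dict.getD d (key x) [] ++ [x])) d).getD c []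
      = PySem.Dict.getD d c [] ++ l.filter (fun x => key x == c) := by
  induction l generalizing d with
  | nil => simp
  | cons x l ih =>
    simp only [List.foldl_cons, List.filter_cons]
    rw [ih]
    by_cases h : key x = c
    · simp [h]
    · simp [h, PySem.Dict.getD_insert, Ne.symm h]

-- A's whole grouping loop in closed form: classes in first-occurrence key order
theorem pvA_fold (key : String → List Bool) (l : List String) :
    PySem.Dict.values
      (l.foldl (fun d x => PySem.Dict.insert d (key x) (PySem.Dict.getD d (key x) [] ++ [x]))
        PySem.Dict.empty)
      = (PySem.Set.ofList (l.map key)).map (fun c => l.filter (fun x => key x == c)) := by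
  have hndk : (l.foldl (fun d x => PySem.Dict.insert d (key x) (PySem.Dict.getD d (key x) [] ++ [x]))
      (PySem.Dict.empty : PySem.Dict (List Bool) (List String))).keys.Nodup :=
    PySem.Dict.nodup_keys_foldl_insert_key l key _ PySem.Dict.empty (by simp)
  rw [PySem.Dict.values_eq_map_keys _ hndk []]
  rw [PySem.Dict.keys_foldl_insert_key l key
    (fun d x => PySem.Dict.getD d (key x) [] ++ [x]) PySem.Dict.empty]
  have hk0 : (PySem.Dict.empty : PySem.Dict (List Bool) (List String)).keys = [] := rfl
  rw [hk0, PySem.Set.update_nil_left]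
  apply List.map_congr_left
  intro c _
  simpa using pvGetD_groupfold key l PySem.Dict.empty c

-- refinement of an empty block list stays empty
theorem pvB_fold_nilparts (cfgs : List (List String)) :
    cfgs.foldl
      (fun (parts : List (List (Int × String))) cfg =>
          let s := PySem.Set.ofList cfg
          parts.foldl
            (fun refined part =>
              let inside := part.filter (fun p => decide (p.2 ∈ s))
              let outside := part.filter (fun p => !decide (p.2 ∈ s))
              let refined := if inside.isEmpty then refined else refined ++ [inside]
              if outside.isEmpty then refined else refined ++ [outside])
            [])
      [] = [] := by
  induction cfgs with
  | nil => rfl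
  | cons c t ih => exact ih


-- with no features the single initial block is empty and vanishes at the first split
theorem pvB_fold_nilparts_cons (cfg0 : List String) (cfgs0 : List (List String)) :
    (cfg0 :: cfgs0).foldl
      (fun (parts : List (List (Int × String))) cfg =>
          let s := PySem.Set.ofList cfg
          parts.foldl
            (fun refined part =>
              let inside := part.filter (fun p => decide (p.2 ∈ s))
              let outside := part.filter (fun p => !decide (p.2 ∈ s))
              let refined := if inside.isEmpty then refined else refined ++ [inside]
              if outside.isEmpty then refined else refined ++ [outside])
            [])
      [PySem.List.enumerate ([] : List String) 0] = [] := by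
  have h1 : (cfg0 :: cfgs0).foldl
      (fun (parts : List (List (Int × String))) cfg =>
          let s := PySem.Set.ofList cfg
          parts.foldl
            (fun refined part =>
              let inside := part.filter (fun p => decide (p.2 ∈ s))
              let outside := part.filter (fun p => !decide (p.2 ∈ s))
              let refined := if inside.isEmpty then refined else refined ++ [inside]
              if outside.isEmpty then refined else refined ++ [outside])
            [])
      [PySem.List.enumerate ([] : List String) 0]
      = cfgs0.foldl
      (fun (parts : List (List (Int × String))) cfg =>
          let s := PySem.Set.ofList cfg
          parts.foldl
            (fun refined part =>
              let inside := part.filter (fun p => decide (p.2 ∈ s))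
              let outside := part.filter (fun p => !decide (p.2 ∈ s))
              let refined := if inside.isEmpty then refined else refined ++ [inside]
              if outside.isEmpty then refined else refined ++ [outside])
            [])
      [] := rfl
  rw [h1]
  exact pvB_fold_nilparts cfgs0

-- ===== VERDICT (by name: the statement is the Claim_ definition above) =====
theorem compute_atomic_sets_py_spec : Claim_equal_compute_atomic_sets_py := by
  intro configs feature_ids _
  unfold Spec_compute_atomic_sets_py
  by_cases hc : configs.isEmpty = true
  · simp [compute_atomic_sets_py, compute_atomic_sets_py_alt, hc]
  · have hc' : configs.isEmpty = false := by simpa using hc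
    obtain ⟨cfg0, cfgs0, hcfg⟩ : ∃ a t, configs = a :: t := by
      cases configs with
      | nil => simp at hc'
      | cons a t => exact ⟨a, t, rfl⟩
    have hB : compute_atomic_sets_py_alt configs feature_ids =
        ((PySem.List.sorted
          (configs.foldl
            (fun (parts : List (List (Int × String))) cfg =>
          let s := PySem.Set.ofList cfg
          parts.foldl
            (fun refined part =>
              let inside := part.filter (fun p => decide (p.2 ∈ s))
              let outside := part.filter (fun p => !decide (p.2 ∈ s))
              let refined := if inside.isEmpty then refined else refined ++ [inside]
              if outside.isEmpty then refined else refined ++ [outside])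
            [])
            [PySem.List.enumerate feature_ids 0])
          (fun part => (part.headD (0, "")).1) false).filter
            (fun part => part.length > 1)).map (fun part => part.map (fun p => p.2)) := by
      simp only [compute_atomic_sets_py_alt, hc', Bool.false_eq_true, if_false]
    have hA : compute_atomic_sets_py configs feature_ids =
        (PySem.Dict.values
          (feature_ids.foldl
            (fun (d : PySem.Dict (List Bool) (List String)) fid =>
              PySem.Dict.insert d
                ((configs.map (fun cfg => PySem.Set.ofList cfg)).map (fun s => decide (fid ∈ s)))
                (PySem.Dict.getD d
                  ((configs.map (fun cfg => PySem.Set.ofList cfg)).map (fun s => decide (fid ∈ s)))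
                  [] ++ [fid]))
            PySem.Dict.empty)).filter (fun group => group.length > 1) := by
      simp only [compute_atomic_sets_py, hc', Bool.false_eq_true, if_false]
    rw [hA, hB]
    rw [pvA_fold (fun fid =>
      (configs.map (fun cfg => PySem.Set.ofList cfg)).map (fun s => decide (fid ∈ s))) feature_ids]
    by_cases hfe : feature_ids = []
    · subst hfe
      subst hcfg
      rw [pvB_fold_nilparts_cons cfg0 cfgs0]
      simp [PySem.List.sorted_eq_foldl_insertBy]
    · -- feature_ids nonempty: the refinement invariant plus the sort
      have hInvInit : pvInv (PySem.List.enumerate feature_ids 0) (fun _ => ([] : List Bool))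
          [[]] [PySem.List.enumerate feature_ids 0] := by
        refine ⟨by simp [pvCls], by simp, by simp, ?_⟩
        intro c hcm
        simp only [List.mem_singleton] at hcm
        subst hcm
        have henum : PySem.List.enumerate feature_ids 0 ≠ [] := by
          cases feature_ids with
          | nil => exact absurd rfl hfe
          | cons a t => simp [PySem.List.enumerate_cons]
        simpa [pvCls] using henum
      obtain ⟨L, hInv0⟩ := pvOuter (PySem.List.enumerate feature_ids 0) configs
        (fun _ => []) [[]] [PySem.List.enumerate feature_ids 0] hInvInit
      have hInv : pvInv (PySem.List.enumerate feature_ids 0)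
          (fun p => (configs.map (fun cfg => PySem.Set.ofList cfg)).map (fun s => decide (p.2 ∈ s)))
          L (configs.foldl
            (fun (parts : List (List (Int × String))) cfg =>
          let s := PySem.Set.ofList cfg
          parts.foldl
            (fun refined part =>
              let inside := part.filter (fun p => decide (p.2 ∈ s))
              let outside := part.filter (fun p => !decide (p.2 ∈ s))
              let refined := if inside.isEmpty then refined else refined ++ [inside]
              if outside.isEmpty then refined else refined ++ [outside])
            [])
            [PySem.List.enumerate feature_ids 0]) :=
        pvInv_congr _ _ _ (fun p => by simp [List.map_map]) _ _ hInv0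
      obtain ⟨hp, hnd, hcov, hne⟩ := hInv
      have hperm : (PySem.Set.ofList ((PySem.List.enumerate feature_ids 0).map
          (fun p => (configs.map (fun cfg => PySem.Set.ofList cfg)).map
            (fun s => decide (p.2 ∈ s))))).Perm L := by
        rw [List.perm_ext_iff_of_nodup (PySem.Set.nodup_ofList _) hnd]
        intro c
        constructor
        · intro hcm
          rw [PySem.Set.mem_ofList] at hcm
          obtain ⟨p, hpl, hkp⟩ := List.mem_map.mp hcm
          exact hkp ▸ hcov p hpl
        · intro hcL
          obtain ⟨p, hpc⟩ := List.exists_mem_of_ne_nil _ (hne c hcL)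
          have hmf := List.mem_filter.mp hpc
          rw [PySem.Set.mem_ofList]
          exact List.mem_map.mpr ⟨p, hmf.1, by simpa using hmf.2⟩
      have hsort : PySem.List.sorted
          (configs.foldl
            (fun (parts : List (List (Int × String))) cfg =>
          let s := PySem.Set.ofList cfg
          parts.foldl
            (fun refined part =>
              let inside := part.filter (fun p => decide (p.2 ∈ s))
              let outside := part.filter (fun p => !decide (p.2 ∈ s))
              let refined := if inside.isEmpty then refined else refined ++ [inside]
              if outside.isEmpty then refined else refined ++ [outside])
            [])
            [PySem.List.enumerate feature_ids 0])
          (fun part => (part.headD (0, "")).1) false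
          = (PySem.Set.ofList ((PySem.List.enumerate feature_ids 0).map
              (fun p => (configs.map (fun cfg => PySem.Set.ofList cfg)).map
                (fun s => decide (p.2 ∈ s))))).map
              (pvCls (PySem.List.enumerate feature_ids 0)
                (fun p => (configs.map (fun cfg => PySem.Set.ofList cfg)).map
                  (fun s => decide (p.2 ∈ s)))) := by
        apply PySem.List.sorted_eq_of_perm_of_pairwise_lt
        · rw [hp]
          exact hperm.map _
        · exact List.pairwise_map.mpr
            (pvSortedTarget (PySem.List.enumerate feature_ids 0)
              (PySem.List.pairwise_lt_enumerate feature_ids 0) _)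
      rw [hsort]
      have hmapkey : (PySem.List.enumerate feature_ids 0).map
          (fun p => (configs.map (fun cfg => PySem.Set.ofList cfg)).map
            (fun s => decide (p.2 ∈ s)))
          = feature_ids.map (fun fid =>
            (configs.map (fun cfg => PySem.Set.ofList cfg)).map (fun s => decide (fid ∈ s))) := by
        conv_rhs => rw [← PySem.List.map_snd_enumerate feature_ids 0]
        rw [List.map_map]
        rfl
      rw [hmapkey]
      have hclsmap : ∀ c, feature_ids.filter (fun x =>
          ((configs.map (fun cfg => PySem.Set.ofList cfg)).map (fun s => decide (x ∈ s))) == c)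
          = (pvCls (PySem.List.enumerate feature_ids 0)
              (fun p => (configs.map (fun cfg => PySem.Set.ofList cfg)).map
                (fun s => decide (p.2 ∈ s))) c).map (fun p => p.2) := by
        intro c
        conv_lhs => rw [← PySem.List.map_snd_enumerate feature_ids 0]
        rw [List.filter_map]
        rfl
      have h1 : (PySem.Set.ofList (feature_ids.map (fun fid =>
            (configs.map (fun cfg => PySem.Set.ofList cfg)).map (fun s => decide (fid ∈ s))))).map
          (fun c => feature_ids.filter (fun x =>
            ((configs.map (fun cfg => PySem.Set.ofList cfg)).map (fun s => decide (x ∈ s))) == c))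
          = ((PySem.Set.ofList (feature_ids.map (fun fid =>
              (configs.map (fun cfg => PySem.Set.ofList cfg)).map (fun s => decide (fid ∈ s))))).map
              (pvCls (PySem.List.enumerate feature_ids 0)
                (fun p => (configs.map (fun cfg => PySem.Set.ofList cfg)).map
                  (fun s => decide (p.2 ∈ s))))).map (fun part => part.map (fun p => p.2)) := by
        rw [List.map_map]
        exact List.map_congr_left (fun c _ => hclsmap c)
      rw [h1]
      rw [List.filter_map]
      congr 1
      apply List.filter_congr
      intro part _
      simp
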